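-- pv_equiv track=rewrite | github.com/nya3jp/aoc2019 | day08/day08b.py | solve
-- ===== SOURCE A (Python) =====
-- from typing import List
--
-- def solve(layers: List[List[str]]) -> List[str]:
--     w, h = len(layers[0][0]), len(layers[0])
--     composed = ['x' * w for _ in range(h)]
--     for i in range(h):
--         for j in range(w):
--             for layer in layers:
--                 if layer[i][j] != '2':
--                     composed[i] = composed[i][:j] + layer[i][j] + composed[i][j+1:]
--                     break
--     return composed
-- ===== SOURCE B (Python) =====
-- from typing import List
--
-- def solve(layers: List[List[str]]) -> List[str]:
--     w, h = len(layers[0][0]), len(layers[0])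
--
--     def pix(layer: List[str], i: int, j: int) -> str:
--         # a pixel the layer does not cover is transparent
--         return layer[i][j] if i < len(layer) and j < len(layer[i]) else '2'
--
--     def over(top: List[str], bottom: List[str]) -> List[str]:
--         return [''.join(bottom[i][j] if pix(top, i, j) == '2' else pix(top, i, j)
--                         for j in range(w))
--                 for i in range(h)]
--
--     composed = ['x' * w] * h
--     for layer in reversed(layers):
--         composed = over(layer, composed)
--     return composed
-- ===== Notes on version B (the rewrite author's own statement) =====
-- stated objective: alternative
-- what changed: B reduces the layer stack back-to-front with a binary whole-image overlay operator (top pixel wins unless it is '2'; pixels a layer does not cover count as transparent) starting from an all-'x' background, instead of A's per-pixel forward scan over the layers with break and string splicing.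
import Mathlib
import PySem

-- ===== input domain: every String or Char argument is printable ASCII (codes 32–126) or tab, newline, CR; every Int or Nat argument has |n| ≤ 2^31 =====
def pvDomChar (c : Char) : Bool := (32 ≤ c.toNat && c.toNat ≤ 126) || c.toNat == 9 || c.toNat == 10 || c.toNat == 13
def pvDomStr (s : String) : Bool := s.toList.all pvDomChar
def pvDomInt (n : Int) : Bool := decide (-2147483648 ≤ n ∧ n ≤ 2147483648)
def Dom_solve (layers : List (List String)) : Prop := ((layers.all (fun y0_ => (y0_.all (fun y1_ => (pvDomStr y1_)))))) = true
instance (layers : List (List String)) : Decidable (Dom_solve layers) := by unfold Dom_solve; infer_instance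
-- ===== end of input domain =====

-- B reduces the layers back-to-front with a binary whole-image overlay operator (uncovered
-- pixels are transparent) from an all-'x' background, instead of A's per-pixel forward scan
-- with break; a different algorithm (no speed claim).

-- ===== PORT A =====
-- layer[i][j] for 0 ≤ i,j known in range under Pre_; the 'x' default is unreachable there.
def pixAt (L : List String) (i j : Nat) : Char := ((L.getD i "").toList).getD j 'x'

-- the inner 'for layer in layers: if layer[i][j] != '2': …; break' scan
def scanLayers (layers : List (List String)) (i j : Nat) : Option Char :=
  match layers with
  | [] => none
  | L :: rest => if pixAt L i j ≠ '2' then some (pixAt L i j) else scanLayers rest i j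

def solve (layers : List (List String)) : List String :=
  let w := ((layers.headD []).headD "").toList.length
  let h := (layers.headD []).length
  let composed := List.replicate h (String.ofList (List.replicate w 'x'))
  (List.range h).foldl (fun comp i =>
    (List.range w).foldl (fun comp j =>
      match scanLayers layers i j with
      | some c => comp.set i (String.ofList (((comp.getD i "").toList.take j) ++ [c] ++ ((comp.getD i "").toList.drop (j+1))))
      | none => comp) comp) composed

-- ===== PORT B =====
-- pix: layer[i][j], with pixels the layer does not cover counting as transparent ('2')
def pixB (L : List String) (i j : Nat) : Char :=
  if i < L.length ∧ j < (L.getD i "").toList.length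
  then ((L.getD i "").toList).getD j '2' else '2'

-- over top bottom: per pixel, the top pixel unless transparent; bottom[i][j] is always in
-- range at the call sites (bottom is an h-by-w image), so the getD default is never used.
def overImg (h w : Nat) (top bottom : List String) : List String :=
  (List.range h).map (fun i =>
    String.ofList ((List.range w).map (fun j =>
      if pixB top i j = '2' then ((bottom.getD i "").toList).getD j 'x' else pixB top i j)))

def solve_alt (layers : List (List String)) : List String :=
  let w := ((layers.headD []).headD "").toList.length
  let h := (layers.headD []).length
  layers.reverse.foldl (fun comp L => overImg h w L comp)
    (List.replicate h (String.ofList (List.replicate w 'x')))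

-- ===== PRECONDITION & SPEC =====
-- Pre_ is exactly the inputs on which Python's A raises no IndexError: layers and layers[0] are
-- nonempty, and for every pixel (i,j) of the h-by-w first layer, every layer the scan reaches
-- there (i.e. all earlier layers contain (i,j) and are '2' at it) itself contains position (i,j).
def Pre_solve (layers : List (List String)) : Prop :=
  layers ≠ [] ∧ layers.headD [] ≠ [] ∧
  (∀ i < (layers.headD []).length, ∀ j < ((layers.headD []).headD "").toList.length,
    ∀ k < layers.length,
      (∀ m < k, i < (layers.getD m []).length ∧ j < ((layers.getD m []).getD i "").toList.length ∧
                ((layers.getD m []).getD i "").toList.getD j 'x' = '2') →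
      i < (layers.getD k []).length ∧ j < ((layers.getD k []).getD i "").toList.length)
-- Decidable: And-split, then Nat.decidableBallLT on each bounded quantifier (infer_instance alone
-- does not find the nested Ball instance).
instance (layers : List (List String)) : Decidable (Pre_solve layers) := by
  unfold Pre_solve
  refine @instDecidableAnd _ _ ?_ (@instDecidableAnd _ _ ?_ ?_)
  · infer_instance
  · infer_instance
  · apply Nat.decidableBallLT

def pvWitness_solve : List (List String) := [["12", "20"], ["01", "11"]]

def Spec_solve (layers : List (List String)) (out : List String) : Prop := out = solve_alt layers
instance (layers : List (List String)) (out : List String) : Decidable (Spec_solve layers out) := by unfold Spec_solve; infer_instance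

-- ===== CLAIM =====
def Claim_equal_solve : Prop := ∀ (layers : List (List String)), Dom_solve layers → Pre_solve layers → Spec_solve layers (solve layers)

-- ===== LEMMAS AND PROOFS =====

-- generic: a foldl over distinct indices, each step setting index i from its old value, acts pointwise
theorem foldl_update_get? {α : Type} (g : List α → Nat → List α) (F : Nat → α → α) (d : α)
    (hg : ∀ c i, i < c.length → g c i = c.set i (F i (c.getD i d))) :
    ∀ (l : List Nat), l.Nodup → ∀ (c : List α), (∀ i ∈ l, i < c.length) → ∀ k,
      getElem? (l.foldl g c) k = if k ∈ l then (getElem? c k).map (F k) else getElem? c k := by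
  intro l
  induction l with
  | nil => intro _ c _ k; simp
  | cons i l' ih =>
    intro hnd c hc k
    have hi : i < c.length := hc i (by simp)
    have hstep : g c i = c.set i (F i (c.getD i d)) := hg c i hi
    have hlen : (g c i).length = c.length := by rw [hstep]; simp
    have hrec := ih hnd.of_cons (g c i) (by intro m hm; rw [hlen]; exact hc m (by simp [hm])) k
    simp only [List.foldl_cons]
    rw [hrec]
    by_cases hk : k = i
    · subst hk
      have hknl : k ∉ l' := (List.nodup_cons.mp hnd).1
      simp only [hknl, List.mem_cons, true_or, if_pos]
      rw [hstep]
      simp [hi, List.getD]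
    · have hne : getElem? (g c i) k = getElem? c k := by rw [hstep]; simp [Ne.symm hk]
      rw [hne]
      simp [List.mem_cons, hk]

-- acting on an indexed initial list, such a fold maps each position
theorem foldl_update_map {α : Type} (g : List α → Nat → List α) (F : Nat → α → α) (d : α)
    (hg : ∀ c i, i < c.length → g c i = c.set i (F i (c.getD i d))) (h : Nat) (φ : Nat → α) :
    (List.range h).foldl g ((List.range h).map φ) = (List.range h).map (fun i => F i (φ i)) := by
  apply List.ext_getElem?
  intro k
  rw [foldl_update_get? g F d hg (List.range h) List.nodup_range ((List.range h).map φ)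
      (by intro m hm; simpa using List.mem_range.mp hm) k]
  by_cases hk : k < h
  · simp [List.mem_range, hk]
  · simp [List.mem_range, hk]

-- splice at an in-range position is set
theorem splice_eq_set (cs : List Char) (j : Nat) (c : Char) (h : j < cs.length) :
    cs.take j ++ [c] ++ cs.drop (j+1) = cs.set j c := by
  rw [List.set_eq_take_append_cons_drop]; simp [h]

theorem replicate_eq_map_range {α : Type} (n : Nat) (x : α) :
    List.replicate n x = (List.range n).map (fun _ => x) := by
  simp [List.map_const']

-- ===== A-side characterisation =====

def rowStepA (layers : List (List String)) (i : Nat) (s : String) (j : Nat) : String :=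
  match scanLayers layers i j with
  | some c => String.ofList ((s.toList.take j) ++ [c] ++ (s.toList.drop (j+1)))
  | none => s

-- collapse A's inner j-fold: it only rewrites row i
theorem A_inner (layers : List (List String)) (i : Nat) :
    ∀ (l : List Nat) (c : List String), i < c.length →
      (l.foldl (fun comp j =>
        match scanLayers layers i j with
        | some c => comp.set i (String.ofList (((comp.getD i "").toList.take j) ++ [c] ++ ((comp.getD i "").toList.drop (j+1))))
        | none => comp) c)
      = c.set i (l.foldl (rowStepA layers i) (c.getD i "")) := by
  intro l
  induction l with
  | nil => intro c hi; simp [List.getD, List.getElem?_eq_getElem hi, List.set_getElem_self]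
  | cons j l' ih =>
    intro c hi
    simp only [List.foldl_cons]
    cases hscan : scanLayers layers i j with
    | none =>
      rw [ih c hi]
      simp [rowStepA, hscan]
    | some ch =>
      rw [ih _ (by simpa using hi)]
      simp [rowStepA, hscan, List.getD, hi, List.set_set]

def rowCharsA (layers : List (List String)) (i : Nat) (w : Nat) : List Char :=
  (List.range w).map (fun j => (scanLayers layers i j).getD 'x')

theorem rowFoldA_chars (layers : List (List String)) (i w : Nat) :
    (List.range w).foldl (rowStepA layers i) (String.ofList (List.replicate w 'x'))
      = String.ofList (rowCharsA layers i w) := by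
  have key : ∀ (l : List Nat) (cs : List Char),
      l.foldl (rowStepA layers i) (String.ofList cs)
        = String.ofList (l.foldl (fun cs j =>
            match scanLayers layers i j with
            | some c => cs.take j ++ [c] ++ cs.drop (j+1)
            | none => cs) cs) := by
    intro l
    induction l with
    | nil => intro cs; rfl
    | cons j l' ih =>
      intro cs
      simp only [List.foldl_cons, rowStepA]
      cases hscan : scanLayers layers i j with
      | none => rw [ih]
      | some c => simp only [String.toList_ofList]; rw [ih]
  rw [key]
  congr 1
  rw [replicate_eq_map_range]
  rw [foldl_update_map
    (fun cs j =>
      match scanLayers layers i j with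
      | some c => cs.take j ++ [c] ++ cs.drop (j+1)
      | none => cs)
    (fun j old => match scanLayers layers i j with | some c => c | none => old) 'x'
    (by
      intro cs j hj
      cases hscan : scanLayers layers i j with
      | none => simp [hscan, List.getD, List.getElem?_eq_getElem hj, List.set_getElem_self]
      | some c => simp [hscan, splice_eq_set cs j c hj])
    w (fun _ => 'x')]
  unfold rowCharsA
  apply List.map_congr_left
  intro j _
  cases scanLayers layers i j <;> simp

theorem solve_fold (layers : List (List String)) (h w : Nat) :
    (List.range h).foldl (fun comp i =>
      (List.range w).foldl (fun comp j =>
        match scanLayers layers i j with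
        | some c => comp.set i (String.ofList (((comp.getD i "").toList.take j) ++ [c] ++ ((comp.getD i "").toList.drop (j+1))))
        | none => comp) comp) (List.replicate h (String.ofList (List.replicate w 'x')))
    = (List.range h).map (fun i => String.ofList (rowCharsA layers i w)) := by
  rw [replicate_eq_map_range]
  rw [foldl_update_map _
    (fun i s => (List.range w).foldl (rowStepA layers i) s) ""
    (by intro c i hi; exact A_inner layers i (List.range w) c hi)
    h (fun _ => String.ofList (List.replicate w 'x'))]
  exact List.map_congr_left (fun i _ => rowFoldA_chars layers i w)

theorem solve_eq_normal (layers : List (List String)) :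
    solve layers = (List.range (layers.headD []).length).map (fun i =>
      String.ofList (rowCharsA layers i ((layers.headD []).headD "").toList.length)) :=
  solve_fold layers (layers.headD []).length ((layers.headD []).headD "").toList.length

-- ===== B-side characterisation =====

-- per-pixel scan condition: each layer the forward scan reaches at (i,j) contains (i,j)
def okPix (ls : List (List String)) (i j : Nat) : Prop :=
  ∀ k < ls.length,
    (∀ m < k, i < (ls.getD m []).length ∧ j < ((ls.getD m []).getD i "").toList.length ∧
              ((ls.getD m []).getD i "").toList.getD j 'x' = '2') →
    i < (ls.getD k []).length ∧ j < ((ls.getD k []).getD i "").toList.length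

theorem okPix_head (L : List String) (ls : List (List String)) (i j : Nat)
    (h : okPix (L :: ls) i j) :
    i < L.length ∧ j < (L.getD i "").toList.length := by
  have := h 0 (by simp) (by intro m hm; omega)
  simpa using this

theorem okPix_tail (L : List String) (ls : List (List String)) (i j : Nat)
    (h : okPix (L :: ls) i j)
    (hL : i < L.length ∧ j < (L.getD i "").toList.length ∧ (L.getD i "").toList.getD j 'x' = '2') :
    okPix ls i j := by
  intro k hk hprem
  have := h (k + 1) (by simp; omega) (by
    intro m hm
    cases m with
    | zero => simpa using hL
    | succ m' =>
      have : (L :: ls).getD (m' + 1) [] = ls.getD m' [] := rfl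
      rw [this]
      exact hprem m' (by omega))
  simpa using this

-- the back-to-front per-pixel combine equals A's forward scan wherever the scan stays in range
theorem chain_eq_scan (i j : Nat) :
    ∀ (ls : List (List String)), okPix ls i j →
      ls.foldr (fun L c => if pixB L i j = '2' then c else pixB L i j) 'x'
        = (scanLayers ls i j).getD 'x' := by
  intro ls
  induction ls with
  | nil => intro _; rfl
  | cons L ls' ih =>
    intro hok
    have hin := okPix_head L ls' i j hok
    have hpix : pixB L i j = pixAt L i j := by
      unfold pixB pixAt
      rw [if_pos hin]
      simp only [List.getD]
      rw [show (L[i]?.getD "").toList[j]? = some ((L[i]?.getD "").toList[j]'hin.2) from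
        List.getElem?_eq_getElem hin.2]
      rfl
    simp only [List.foldr_cons, scanLayers, hpix]
    by_cases h2 : pixAt L i j = '2'
    · rw [if_pos h2, if_neg (by simp [h2])]
      exact ih (okPix_tail L ls' i j hok ⟨hin.1, hin.2, h2⟩)
    · rw [if_neg h2, if_pos h2]
      rfl

-- one overlay step on an image given as an indexed map of rows of width w
theorem overImg_map (h w : Nat) (L : List String) (ψ : Nat → Nat → Char) :
    overImg h w L ((List.range h).map (fun i => String.ofList ((List.range w).map (ψ i))))
      = (List.range h).map (fun i => String.ofList ((List.range w).map (fun j =>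
          if pixB L i j = '2' then ψ i j else pixB L i j))) := by
  unfold overImg
  apply List.map_congr_left
  intro i hi
  have hih : i < h := List.mem_range.mp hi
  have hbot : (((List.range h).map (fun i => String.ofList ((List.range w).map (ψ i)))).getD i "")
      = String.ofList ((List.range w).map (ψ i)) := by
    simp [List.getD, List.getElem?_map, List.getElem?_eq_getElem (by simpa using hih : i < (List.range h).length)]
  rw [hbot]
  congr 1
  apply List.map_congr_left
  intro j hj
  have hjw : j < w := List.mem_range.mp hj
  have hget : ((List.range w).map (ψ i)).getD j 'x' = ψ i j := by
    simp [List.getD, List.getElem?_map, List.getElem?_eq_getElem (by simpa using hjw : j < (List.range w).length)]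
  simp only [String.toList_ofList, hget]

-- the whole right fold of overlays, pixel by pixel
theorem B_outer (h w : Nat) :
    ∀ (ls : List (List String)) (ψ : Nat → Nat → Char),
      ls.foldr (fun L comp => overImg h w L comp)
        ((List.range h).map (fun i => String.ofList ((List.range w).map (ψ i))))
      = (List.range h).map (fun i => String.ofList ((List.range w).map (fun j =>
          ls.foldr (fun L c => if pixB L i j = '2' then c else pixB L i j) (ψ i j)))) := by
  intro ls
  induction ls with
  | nil => intro ψ; rfl
  | cons L ls' ih =>
    intro ψ
    simp only [List.foldr_cons]
    rw [ih ψ, overImg_map h w L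
      (fun i j => ls'.foldr (fun L c => if pixB L i j = '2' then c else pixB L i j) (ψ i j))]

theorem solve_alt_eq_normal (layers : List (List String)) (hpre : Pre_solve layers) :
    solve_alt layers = (List.range (layers.headD []).length).map (fun i =>
      String.ofList (rowCharsA layers i ((layers.headD []).headD "").toList.length)) := by
  unfold solve_alt
  rw [List.foldl_reverse]
  have hinit : List.replicate (layers.headD []).length
        (String.ofList (List.replicate ((layers.headD []).headD "").toList.length 'x'))
      = (List.range (layers.headD []).length).map (fun i =>
          String.ofList ((List.range ((layers.headD []).headD "").toList.length).map (fun _ => 'x'))) := by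
    rw [replicate_eq_map_range]
    apply List.map_congr_left
    intro i _
    rw [replicate_eq_map_range]
  rw [hinit, B_outer]
  apply List.map_congr_left
  intro i hi
  congr 1
  unfold rowCharsA
  apply List.map_congr_left
  intro j hj
  exact chain_eq_scan i j layers
    (hpre.2.2 i (List.mem_range.mp hi) j (List.mem_range.mp hj))

-- ===== VERDICT (by name: the statement is the Claim_ definition above) =====
theorem solve_spec : Claim_equal_solve := by
  intro layers _ hpre
  unfold Spec_solve
  rw [solve_eq_normal, solve_alt_eq_normal layers hpre]
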